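-- pv_equiv track=rewrite | github.com/GarrettXUPT/papper | verionCon/booleanFunctionVersion2/addDeg.py | getDegree
-- ===== SOURCE A (Python) =====
-- def bitBiger(lst1, lst2):
--     j = 0
--     len1 = len(lst1)
--     for i in range(len1):
--         if lst1[i] < lst2[j]:
--             return False
--         j += 1
--     return True
--
-- def cAlpha(lst1, F2N, longTruthtable):
--     ret = 0
--     len1 = len(F2N)
--     for i in range(len1):
--         if bitBiger(lst1, F2N[i]) == True:
--             ret = (ret +  longTruthtable[i]) % 2
--     return ret
--
-- def getDegree(longTable, allInputTable):
--     retLst = []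
--     len1 = len(allInputTable)
--     for i in range(len1):
--         retLst.append(cAlpha(allInputTable[i], allInputTable, longTable))
--
--     maxdeg = 0
--     len2 = len(retLst)
--     for i in range(len2):
--         if retLst[i] == 1:
--            deg = allInputTable[i].count(1)
--            if deg > maxdeg:
--                 maxdeg = deg
--     return maxdeg
-- ===== SOURCE B (Python) =====
-- def getDegree(longTable, allInputTable):
--     # Sort monomial rows by weight descending, then scan lazily: the first row
--     # whose ANF coefficient (parity of the truth-table entries it dominates) is
--     # odd gives the degree; once weight 0 is reached nothing can improve on 0.
--     for a in sorted(allInputTable, key=lambda r: -r.count(1)):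
--         w = a.count(1)
--         if w == 0:
--             return 0
--         s = 0
--         for t, b in zip(longTable, allInputTable):
--             if len(b) >= len(a) and all(x >= y for x, y in zip(a, b)):
--                 s += t
--         if s % 2 == 1:
--             return w
--     return 0
-- ===== Notes on version B (the rewrite author's own statement) =====
-- stated objective: faster
-- what changed: A eagerly computes every ANF coefficient into an intermediate retLst (per-row inner dominance scan with a running '% 2') and then takes the max weight in a second pass; B sorts the rows by weight descending and scans lazily, computing a coefficient parity only for rows it actually reaches and returning at the first odd coefficient (or at weight 0), so coefficients of lighter rows are never computed.
import Mathlib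
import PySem

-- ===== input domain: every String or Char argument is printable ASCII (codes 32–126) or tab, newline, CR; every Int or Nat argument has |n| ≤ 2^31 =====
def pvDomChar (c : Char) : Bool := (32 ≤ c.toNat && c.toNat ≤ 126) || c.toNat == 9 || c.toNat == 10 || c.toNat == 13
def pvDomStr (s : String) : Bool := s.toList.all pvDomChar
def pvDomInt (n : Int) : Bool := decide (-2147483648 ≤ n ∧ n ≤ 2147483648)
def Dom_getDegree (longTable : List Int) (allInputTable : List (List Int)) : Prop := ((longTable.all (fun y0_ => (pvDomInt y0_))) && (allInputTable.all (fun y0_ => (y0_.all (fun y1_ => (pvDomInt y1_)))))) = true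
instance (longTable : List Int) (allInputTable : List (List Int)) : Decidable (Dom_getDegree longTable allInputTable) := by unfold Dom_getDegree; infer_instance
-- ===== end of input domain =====

-- B sorts the rows by weight descending and scans lazily, returning at the first
-- odd ANF coefficient instead of computing them all into A's retLst (objective: faster, measured).

-- ===== PORT A =====
def bitBigerGo (lst1 lst2 : List Int) (i : Nat) : Option Bool :=
  if h : i < lst1.length then
    match PySem.List.pyGet? lst2 (i : Int) with
    | none => none                                   -- IndexError in Python
    | some b => if lst1[i] < b then some false else bitBigerGo lst1 lst2 (i + 1)
  else some true
termination_by lst1.length - i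

def bitBiger (lst1 lst2 : List Int) : Option Bool := bitBigerGo lst1 lst2 0

def cAlphaGo (lst1 : List Int) (F2N : List (List Int)) (longTruthtable : List Int) (i : Nat) (ret : Int) : Option Int :=
  if h : i < F2N.length then
    match bitBiger lst1 F2N[i] with
    | none => none
    | some b =>
      if b then
        match PySem.List.pyGet? longTruthtable (i : Int) with
        | none => none                               -- IndexError in Python
        | some t => cAlphaGo lst1 F2N longTruthtable (i + 1) (PySem.Int.mod (ret + t) 2)
      else cAlphaGo lst1 F2N longTruthtable (i + 1) ret
  else some ret
termination_by F2N.length - i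

def cAlpha (lst1 : List Int) (F2N : List (List Int)) (longTruthtable : List Int) : Option Int :=
  cAlphaGo lst1 F2N longTruthtable 0 0

def buildRetLst (longTable : List Int) (allInputTable : List (List Int)) (i : Nat) (retLst : List Int) : Option (List Int) :=
  if h : i < allInputTable.length then
    match cAlpha allInputTable[i] allInputTable longTable with
    | none => none
    | some v => buildRetLst longTable allInputTable (i + 1) (retLst ++ [v])
  else some retLst
termination_by allInputTable.length - i

def maxDegLoop (retLst : List Int) (allInputTable : List (List Int)) (i : Nat) (maxdeg : Int) : Int :=
  if h : i < retLst.length then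
    if retLst[i] == (1 : Int) then
      match PySem.List.pyGet? allInputTable (i : Int) with
      | none => maxDegLoop retLst allInputTable (i + 1) maxdeg  -- unreachable: retLst mirrors allInputTable
      | some row =>
        let deg : Int := (PySem.List.count row 1 : Int)
        if deg > maxdeg then maxDegLoop retLst allInputTable (i + 1) deg
        else maxDegLoop retLst allInputTable (i + 1) maxdeg
    else maxDegLoop retLst allInputTable (i + 1) maxdeg
  else maxdeg
termination_by retLst.length - i

def getDegree (longTable : List Int) (allInputTable : List (List Int)) : Int :=
  match buildRetLst longTable allInputTable 0 [] with
  | none => 0                                        -- Python raises here; excluded by Pre_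
  | some retLst => maxDegLoop retLst allInputTable 0 0

-- ===== PORT B =====
-- 'len(b) >= len(a) and all(x >= y for x, y in zip(a, b))'
def covers (a b : List Int) : Bool :=
  decide (b.length ≥ a.length) && (a.zip b).all (fun xy => decide (xy.1 ≥ xy.2))

-- the inner 'for t, b in zip(...): if ...: s += t'
def sumCov (longTable : List Int) (F : List (List Int)) (a : List Int) : Int :=
  (longTable.zip F).foldl (fun s tb => if covers a tb.2 then s + tb.1 else s) 0

-- the outer for-loop over the sorted rows, with its two early returns
def scanDeg (longTable : List Int) (F : List (List Int)) : List (List Int) → Int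
  | [] => 0
  | a :: rest =>
    if (PySem.List.count a 1 : Int) = 0 then 0
    else if PySem.Int.mod (sumCov longTable F a) 2 = 1 then (PySem.List.count a 1 : Int)
    else scanDeg longTable F rest

def getDegree_alt (longTable : List Int) (allInputTable : List (List Int)) : Int :=
  scanDeg longTable allInputTable
    (PySem.List.sorted allInputTable (fun r => -(PySem.List.count r 1 : Int)) false)

-- ===== PRECONDITION & SPEC =====
-- bbRaises r1 r2 ↔ bitBiger(r1, r2) raises IndexError: r2 runs out before r1 with no earlier early-return.
def bbRaises (l1 l2 : List Int) : Bool :=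
  decide (l2.length < l1.length) && (List.range l2.length).all (fun k => decide (l2.getD k 0 ≤ l1.getD k 0))

-- Pre_ is exactly the set of inputs on which A returns (otherwise A raises IndexError).
def Pre_getDegree (longTable : List Int) (allInputTable : List (List Int)) : Prop :=
  allInputTable.length ≤ longTable.length ∧
  ∀ r1 ∈ allInputTable, ∀ r2 ∈ allInputTable, bbRaises r1 r2 = false

instance (longTable : List Int) (allInputTable : List (List Int)) : Decidable (Pre_getDegree longTable allInputTable) := by
  unfold Pre_getDegree; infer_instance

def pvWitness_getDegree : List Int × List (List Int) := ([0, 1, 1, 1], [[0, 0], [0, 1], [1, 0], [1, 1]])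

def Spec_getDegree (longTable : List Int) (allInputTable : List (List Int)) (out : Int) : Prop := out = getDegree_alt longTable allInputTable
instance (longTable : List Int) (allInputTable : List (List Int)) (out : Int) : Decidable (Spec_getDegree longTable allInputTable out) := by unfold Spec_getDegree; infer_instance

-- ===== CLAIM (what is proved, stated in full; the proofs are below) =====
def Claim_equal_getDegree : Prop := ∀ (longTable : List Int) (allInputTable : List (List Int)), Dom_getDegree longTable allInputTable → Pre_getDegree longTable allInputTable → Spec_getDegree longTable allInputTable (getDegree longTable allInputTable)

-- ===== LEMMAS AND PROOFS =====

def b2i (b : Bool) : Int := if b then 1 else 0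

def stepf (a : List Int) (acc : Bool) (tb : Int × List Int) : Bool :=
  acc ^^ (PySem.Int.mod tb.1 2 != 0 && covers a tb.2)

def specPar (lt : List Int) (F : List (List Int)) (a : List Int) : Bool :=
  (lt.zip F).foldl (stepf a) false

def rowW (a : List Int) : Int := (PySem.List.count a 1 : Int)

lemma covers_eq_decide (a b : List Int) :
    covers a b = decide (a.length ≤ b.length ∧ ∀ k, k < a.length → b.getD k 0 ≤ a.getD k 0) := by
  rw [Bool.eq_iff_iff]
  simp only [covers, Bool.and_eq_true, decide_eq_true_eq, List.all_eq_true, ge_iff_le]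
  constructor
  · rintro ⟨hl, hall⟩
    refine ⟨hl, fun k hk => ?_⟩
    have hkz : k < (a.zip b).length := by simp [List.length_zip]; omega
    have := hall _ (List.getElem_mem hkz)
    rw [List.getElem_zip] at this
    rw [List.getD_eq_getElem a 0 hk, List.getD_eq_getElem b 0 (by omega)]
    exact this
  · rintro ⟨hl, hk⟩
    refine ⟨hl, fun xy hxy => ?_⟩
    obtain ⟨k, hkz, rfl⟩ := List.getElem_of_mem hxy
    rw [List.getElem_zip]
    have hka : k < a.length := by simp [List.length_zip] at hkz; omega
    have := hk k hka
    rwa [List.getD_eq_getElem a 0 hka, List.getD_eq_getElem b 0 (by simp [List.length_zip] at hkz; omega)] at this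

lemma bbRaises_false_iff (a b : List Int) :
    bbRaises a b = false ↔ (b.length < a.length → ∃ k, k < b.length ∧ a.getD k 0 < b.getD k 0) := by
  simp only [bbRaises, Bool.and_eq_false_iff, decide_eq_false_iff_not, not_lt,
    List.all_eq_false, List.mem_range, decide_eq_true_eq]
  constructor
  · rintro (h | ⟨k, hk, hlt⟩)
    · intro hc; omega
    · exact fun _ => ⟨k, hk, by omega⟩
  · intro h
    by_cases hl : b.length < a.length
    · obtain ⟨k, hk, hlt⟩ := h hl
      exact Or.inr ⟨k, hk, by omega⟩
    · exact Or.inl (by omega)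

lemma bitBigerGo_spec (a b : List Int) (H : bbRaises a b = false) :
    ∀ i, i ≤ b.length → (∀ k, k < i → b.getD k 0 ≤ a.getD k 0) →
      bitBigerGo a b i = some (covers a b) := by
  suffices H2 : ∀ n i, a.length - i ≤ n → i ≤ b.length → (∀ k, k < i → b.getD k 0 ≤ a.getD k 0) →
      bitBigerGo a b i = some (covers a b) from fun i => H2 a.length i (by omega)
  intro n
  induction n with
  | zero =>
    intro i hn hib hpre
    unfold bitBigerGo
    rw [dif_neg (by omega)]
    rw [covers_eq_decide, decide_eq_true (by exact ⟨by omega, fun k hk => hpre k (by omega)⟩)]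
  | succ n ih =>
    intro i hn hib hpre
    unfold bitBigerGo
    by_cases h : i < a.length
    · rw [dif_pos h]
      by_cases hb : i < b.length
      · rw [show PySem.List.pyGet? b (i : Int) = some b[i] by
          simp [PySem.List.pyGet?_natCast, List.getElem?_eq_getElem hb]]
        dsimp only
        by_cases hlt : a[i] < b[i]
        · rw [if_pos hlt]
          rw [covers_eq_decide, decide_eq_false]
          rintro ⟨-, hall⟩
          have := hall i h
          rw [List.getD_eq_getElem a 0 h, List.getD_eq_getElem b 0 hb] at this
          omega
        · rw [if_neg hlt]
          exact ih (i + 1) (by omega) (by omega) (fun k hk => by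
            rcases Nat.lt_succ_iff_lt_or_eq.mp hk with hk' | rfl
            · exact hpre k hk'
            · rw [List.getD_eq_getElem a 0 h, List.getD_eq_getElem b 0 hb]; omega)
      · exfalso
        have hbi : b.length = i := by omega
        have := (bbRaises_false_iff a b).mp H (by omega)
        obtain ⟨k, hk, hlt⟩ := this
        have := hpre k (by omega)
        omega
    · rw [dif_neg h]
      rw [covers_eq_decide, decide_eq_true (by exact ⟨by omega, fun k hk => hpre k (by omega)⟩)]

lemma bitBiger_spec (a b : List Int) (H : bbRaises a b = false) :
    bitBiger a b = some (covers a b) :=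
  bitBigerGo_spec a b H 0 (Nat.zero_le _) (fun k hk => absurd hk (Nat.not_lt_zero k))

lemma mod_step (bb : Bool) (t : Int) :
    PySem.Int.mod (b2i bb + t) 2 = b2i (bb ^^ (PySem.Int.mod t 2 != 0)) := by
  rw [PySem.Int.mod_eq_emod_of_pos (by norm_num), PySem.Int.mod_eq_emod_of_pos (by norm_num)]
  rcases Int.emod_two_eq t with h | h <;>
    cases bb <;> simp [b2i, h, bne] <;> omega

lemma cAlphaGo_spec (a : List Int) (F : List (List Int)) (lt : List Int)
    (hlen : F.length ≤ lt.length) (H : ∀ r ∈ F, bbRaises a r = false) :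
    ∀ i (bb : Bool), cAlphaGo a F lt i (b2i bb) =
      some (b2i (((lt.drop i).zip (F.drop i)).foldl (stepf a) bb)) := by
  suffices H2 : ∀ n i bb, F.length - i ≤ n → cAlphaGo a F lt i (b2i bb) =
      some (b2i (((lt.drop i).zip (F.drop i)).foldl (stepf a) bb)) from
    fun i bb => H2 F.length i bb (by omega)
  intro n
  induction n with
  | zero =>
    intro i bb hn
    unfold cAlphaGo
    rw [dif_neg (by omega), show F.drop i = [] from List.drop_eq_nil_of_le (by omega)]
    simp
  | succ n ih =>
    intro i bb hn
    unfold cAlphaGo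
    by_cases h : i < F.length
    · rw [dif_pos h]
      rw [bitBiger_spec a F[i] (H _ (List.getElem_mem h))]
      dsimp only
      have hlt' : i < lt.length := by omega
      rw [List.drop_eq_getElem_cons hlt', List.drop_eq_getElem_cons h, List.zip_cons_cons,
        List.foldl_cons]
      by_cases hc : covers a F[i]
      · rw [if_pos hc]
        rw [show PySem.List.pyGet? lt (i : Int) = some lt[i] by
          simp [PySem.List.pyGet?_natCast, List.getElem?_eq_getElem hlt']]
        dsimp only
        rw [mod_step, ih (i + 1) _ (by omega)]
        congr 2
        simp [stepf, hc]
      · rw [if_neg hc]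
        rw [ih (i + 1) bb (by omega)]
        congr 2
        simp [stepf, hc]
    · rw [dif_neg h, show F.drop i = [] from List.drop_eq_nil_of_le (by omega)]
      simp

lemma cAlpha_spec (a : List Int) (F : List (List Int)) (lt : List Int)
    (hlen : F.length ≤ lt.length) (H : ∀ r ∈ F, bbRaises a r = false) :
    cAlpha a F lt = some (b2i (specPar lt F a)) := by
  have := cAlphaGo_spec a F lt hlen H 0 false
  simpa [cAlpha, b2i, specPar] using this

lemma buildRetLst_spec (lt : List Int) (F : List (List Int))
    (hpre : Pre_getDegree lt F) :
    ∀ i acc, buildRetLst lt F i acc = some (acc ++ (F.drop i).map (fun a => b2i (specPar lt F a))) := by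
  suffices H2 : ∀ n i acc, F.length - i ≤ n → buildRetLst lt F i acc =
      some (acc ++ (F.drop i).map (fun a => b2i (specPar lt F a))) from
    fun i acc => H2 F.length i acc (by omega)
  intro n
  induction n with
  | zero =>
    intro i acc hn
    unfold buildRetLst
    rw [dif_neg (by omega), show F.drop i = [] from List.drop_eq_nil_of_le (by omega)]
    simp
  | succ n ih =>
    intro i acc hn
    unfold buildRetLst
    by_cases h : i < F.length
    · rw [dif_pos h]
      rw [cAlpha_spec F[i] F lt hpre.1 (hpre.2 _ (List.getElem_mem h))]
      dsimp only
      rw [ih (i + 1) _ (by omega), List.drop_eq_getElem_cons h, List.map_cons]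
      simp
    · rw [dif_neg h, show F.drop i = [] from List.drop_eq_nil_of_le (by omega)]
      simp

lemma maxDegLoop_spec (lt : List Int) (F : List (List Int)) :
    ∀ i best, maxDegLoop (F.map (fun a => b2i (specPar lt F a))) F i best =
      (F.drop i).foldl (fun best a =>
        if specPar lt F a then
          (if (PySem.List.count a 1 : Int) > best then (PySem.List.count a 1 : Int) else best)
        else best) best := by
  suffices H2 : ∀ n i best, F.length - i ≤ n → maxDegLoop (F.map (fun a => b2i (specPar lt F a))) F i best =
      (F.drop i).foldl (fun best a =>
        if specPar lt F a then
          (if (PySem.List.count a 1 : Int) > best then (PySem.List.count a 1 : Int) else best)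
        else best) best from fun i best => H2 F.length i best (by omega)
  intro n
  induction n with
  | zero =>
    intro i best hn
    unfold maxDegLoop
    rw [dif_neg (by simp; omega), show F.drop i = [] from List.drop_eq_nil_of_le (by omega)]
    simp
  | succ n ih =>
    intro i best hn
    unfold maxDegLoop
    by_cases h : i < F.length
    · rw [dif_pos (by simp; omega)]
      have hget : (F.map (fun a => b2i (specPar lt F a)))[i]'(by simp; omega) = b2i (specPar lt F F[i]) := by
        simp
      rw [hget]
      rw [show PySem.List.pyGet? F (i : Int) = some F[i] by
        simp [PySem.List.pyGet?_natCast, List.getElem?_eq_getElem h]]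
      rw [List.drop_eq_getElem_cons h, List.foldl_cons]
      by_cases hs : specPar lt F F[i]
      · rw [show (b2i (specPar lt F F[i]) == (1:Int)) = true by simp [hs, b2i], if_pos rfl]
        dsimp only
        by_cases hgt : (PySem.List.count F[i] 1 : Int) > best
        · rw [if_pos hgt, ih (i+1) _ (by omega), if_pos hs, if_pos hgt]
        · rw [if_neg hgt, ih (i+1) _ (by omega), if_pos hs, if_neg hgt]
      · rw [show (b2i (specPar lt F F[i]) == (1:Int)) = false by simp [hs, b2i], if_neg (by simp), ih (i+1) _ (by omega), if_neg hs]
    · rw [dif_neg (by simp; omega), show F.drop i = [] from List.drop_eq_nil_of_le (by omega)]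
      simp

-- A's accumulation step is a max, so A's value is a fold of max over the odd-coefficient weights.
lemma fold_max_form (lt : List Int) (F : List (List Int)) :
    ∀ (G : List (List Int)) (b : Int),
      G.foldl (fun best a =>
        if specPar lt F a then
          (if (PySem.List.count a 1 : Int) > best then (PySem.List.count a 1 : Int) else best)
        else best) b
      = ((G.filter (fun a => specPar lt F a)).map rowW).foldl max b := by
  intro G
  induction G with
  | nil => intro b; simp
  | cons a G ih =>
    intro b
    rw [List.foldl_cons]
    by_cases hs : specPar lt F a
    · rw [if_pos hs]
      have : (if (PySem.List.count a 1 : Int) > b then (PySem.List.count a 1 : Int) else b)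
           = max b (rowW a) := by unfold rowW; split_ifs <;> omega
      rw [this, List.filter_cons_of_pos (by simpa using hs), List.map_cons, List.foldl_cons, ih]
    · rw [if_neg hs, List.filter_cons_of_neg (by simpa using hs), ih]

lemma foldl_max_of_le (b : Int) : ∀ (l : List Int), (∀ x ∈ l, x ≤ b) → l.foldl max b = b := by
  intro l
  induction l generalizing b with
  | nil => intro _; rfl
  | cons x l ih =>
    intro h
    rw [List.foldl_cons, max_eq_left (h x (by simp))]
    exact ih b (fun y hy => h y (by simp [hy]))

lemma foldl_max_perm (b : Int) {l1 l2 : List Int} (h : l1.Perm l2) :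
    l1.foldl max b = l2.foldl max b :=
  h.foldl_eq b

-- the sum parity computed by B equals the xor parity specPar
lemma sum_parity (a : List Int) :
    ∀ (l : List (Int × List Int)) (s : Int) (bb : Bool), (s % 2 = 1 ↔ bb = true) →
      ((l.foldl (fun s tb => if covers a tb.2 then s + tb.1 else s) s) % 2 = 1
        ↔ l.foldl (stepf a) bb = true) := by
  intro l
  induction l with
  | nil => intro s bb h; simpa using h
  | cons tb l ih =>
    intro s bb h
    rw [List.foldl_cons, List.foldl_cons]
    by_cases hc : covers a tb.2
    · rw [if_pos hc]
      apply ih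
      have hodd : (PySem.Int.mod tb.1 2 != 0) = decide (tb.1 % 2 = 1) := by
        have hm : PySem.Int.mod tb.1 2 = tb.1 % 2 := PySem.Int.mod_eq_emod_of_pos (by norm_num)
        rw [hm, Bool.eq_iff_iff]
        simp [bne]
      simp only [stepf, hc, Bool.and_true, hodd]
      cases bb <;> simp at h ⊢ <;> omega
    · rw [if_neg hc]
      have hst : stepf a bb tb = bb := by simp [stepf, hc]
      rw [hst]
      exact ih s bb h

lemma odd_iff_specPar (lt : List Int) (F : List (List Int)) (a : List Int) :
    (PySem.Int.mod (sumCov lt F a) 2 = 1) ↔ specPar lt F a = true := by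
  have hm : PySem.Int.mod (sumCov lt F a) 2 = (sumCov lt F a) % 2 :=
    PySem.Int.mod_eq_emod_of_pos (by norm_num)
  rw [hm]
  exact sum_parity a (lt.zip F) 0 false (by norm_num)

lemma rowW_nonneg (a : List Int) : 0 ≤ rowW a := by
  unfold rowW; exact Int.natCast_nonneg _

-- B's lazy scan over any weight-nonincreasing rearrangement computes A's fold of max.
lemma scanDeg_spec (lt : List Int) (F : List (List Int)) :
    ∀ (order : List (List Int)), order.Pairwise (fun a b => rowW b ≤ rowW a) →
      ∀ (G : List (List Int)), G.Perm order →
        scanDeg lt F order = ((G.filter (fun a => specPar lt F a)).map rowW).foldl max 0 := by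
  intro order
  induction order with
  | nil =>
    intro _ G hperm
    rw [List.perm_nil.mp hperm]
    rfl
  | cons a rest ih =>
    intro hpair G hperm
    have hmaxw : ∀ x ∈ rest, rowW x ≤ rowW a := fun x hx => (List.pairwise_cons.mp hpair).1 x hx
    have hGfold : ((G.filter (fun a => specPar lt F a)).map rowW).foldl max (0:Int)
        = (((a :: rest).filter (fun a => specPar lt F a)).map rowW).foldl max 0 :=
      foldl_max_perm 0 ((hperm.filter _).map _)
    rw [hGfold]
    unfold scanDeg
    by_cases hw : rowW a = 0
    · rw [if_pos (by simpa [rowW] using hw)]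
      have hall : ∀ x ∈ ((a :: rest).filter (fun a => specPar lt F a)).map rowW, x ≤ (0:Int) := by
        intro x hx
        simp only [List.mem_map, List.mem_filter] at hx
        obtain ⟨y, ⟨hy, -⟩, rfl⟩ := hx
        rcases List.mem_cons.mp hy with rfl | hy'
        · omega
        · have := hmaxw y hy'; omega
      rw [foldl_max_of_le 0 _ hall]
    · rw [if_neg (by simpa [rowW] using hw)]
      by_cases hs : specPar lt F a
      · rw [if_pos ((odd_iff_specPar lt F a).mpr hs)]
        rw [List.filter_cons_of_pos (by simpa using hs), List.map_cons, List.foldl_cons]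
        have h0 : max (0:Int) (rowW a) = rowW a := by
          have := rowW_nonneg a; omega
        rw [h0]
        have hall : ∀ x ∈ (rest.filter (fun a => specPar lt F a)).map rowW, x ≤ rowW a := by
          intro x hx
          simp only [List.mem_map, List.mem_filter] at hx
          obtain ⟨y, ⟨hy, -⟩, rfl⟩ := hx
          exact hmaxw y hy
        rw [foldl_max_of_le _ _ hall]
        rfl
      · rw [if_neg (by rw [odd_iff_specPar]; simpa using hs)]
        rw [List.filter_cons_of_neg (by simpa using hs)]
        exact ih (List.pairwise_cons.mp hpair).2 rest (List.Perm.refl rest)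

-- ===== VERDICT (by name: the statement is the Claim_ definition above) =====
theorem getDegree_spec : Claim_equal_getDegree := by
  intro lt F _ hpre
  unfold Spec_getDegree getDegree getDegree_alt
  rw [buildRetLst_spec lt F hpre 0 []]
  simp only [List.drop_zero, List.nil_append]
  rw [maxDegLoop_spec lt F 0 0, List.drop_zero, fold_max_form lt F F 0]
  have hpair : (PySem.List.sorted F (fun r => -(PySem.List.count r 1 : Int)) false).Pairwise
      (fun a b => rowW b ≤ rowW a) := by
    have := PySem.List.sorted_pairwise (xs := F) (key := fun r => -(PySem.List.count r 1 : Int))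
    exact this.imp (by intro a b h; unfold rowW; omega)
  have hperm : F.Perm (PySem.List.sorted F (fun r => -(PySem.List.count r 1 : Int)) false) :=
    (PySem.List.sorted_perm ..).symm
  rw [scanDeg_spec lt F _ hpair F hperm]
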